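-- pv_equiv track=rewrite | github.com/nonioAtoz/tools_for_windows | Windows10_structed_data/get_windows_info.py | clean_string_dots
-- ===== SOURCE A (Python) =====
-- def clean_string_dots(str_to_clean=None):
--     """
--     this function try to clean a string like "Media. . . . . . . . . . . "
--     it will eliminate all the dots and blanck spaces
--     :param str_to_clean: <string>
--     :return: <string>
--     """
--
--     if str_to_clean is None:
--         raise("Error, We need  a string")
--
--     start_recording = False
--     output_str = ""
--
--     for i in range(len(str_to_clean) -1, -1, -1):
--         if str_to_clean[i] != "." and  str_to_clean[i] != " ":
--             start_recording = True
--         if start_recording == True: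
--             output_str = output_str + str_to_clean[i]
--
--     output_str =  output_str[::-1]
--     return output_str
-- ===== SOURCE B (Python) =====
-- def clean_string_dots(str_to_clean=None):
--     if str_to_clean is None:
--         raise("Error, We need  a string")
--     end = len(str_to_clean)
--     while end > 0 and str_to_clean[end - 1] in ". ":
--         end -= 1
--     return str_to_clean[:end]
-- ===== Notes on version B (the rewrite author's own statement) =====
-- stated objective: simpler
-- what changed: B walks an end index back over the trailing dots and spaces and returns a single slice of the input, instead of A's full reversed scan with a recording flag that rebuilds the string character by character and reverses it at the end.
import Mathlib
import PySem

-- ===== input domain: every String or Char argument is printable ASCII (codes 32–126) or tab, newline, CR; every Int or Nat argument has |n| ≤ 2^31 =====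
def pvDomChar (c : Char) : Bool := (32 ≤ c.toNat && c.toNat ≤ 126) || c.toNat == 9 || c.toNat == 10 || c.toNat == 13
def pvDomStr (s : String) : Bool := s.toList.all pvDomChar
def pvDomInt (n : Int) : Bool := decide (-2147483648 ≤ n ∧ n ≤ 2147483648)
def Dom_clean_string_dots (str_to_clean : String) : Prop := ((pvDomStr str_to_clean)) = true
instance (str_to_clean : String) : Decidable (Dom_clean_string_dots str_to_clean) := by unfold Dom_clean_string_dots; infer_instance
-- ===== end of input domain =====

-- B strips the trailing dots and spaces by moving an end index back and taking one slice, instead of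
-- A's reversed scan with a recording flag that rebuilds the string and reverses it (objective: simpler).
-- The None-argument TypeError of the Pythons is outside the String signature; both ports are total.

-- ===== PORT A =====
def clean_string_dots (str_to_clean : String) : String :=
  let l := str_to_clean.toList
  let st := (PySem.List.pyRange (PySem.Str.len str_to_clean - 1) (-1) (-1)).foldl
    (fun (acc : Bool × List Char) i =>
      let c := PySem.List.pyGetD l i ' '
      let sr := if c ≠ '.' ∧ c ≠ ' ' then true else acc.1
      (sr, if sr = true then acc.2 ++ [c] else acc.2))
    (false, [])
  -- output_str[::-1]; step -1 ≠ 0, so slice? is always `some` here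
  String.ofList ((PySem.List.slice? st.2 none none (-1)).getD [])

-- ===== PORT B =====
-- while end > 0 and str_to_clean[end-1] in ". ": end -= 1   (structural recursion on the index)
def pvAltEnd (l : List Char) : Nat → Nat
  | 0 => 0
  | n + 1 => if l.getD n ' ' = '.' ∨ l.getD n ' ' = ' ' then pvAltEnd l n else n + 1

def clean_string_dots_alt (str_to_clean : String) : String :=
  let l := str_to_clean.toList
  String.ofList (PySem.List.slice l none (some (pvAltEnd l l.length : Int)))

-- ===== PRECONDITION & SPEC =====
def Spec_clean_string_dots (str_to_clean : String) (out : String) : Prop := out = clean_string_dots_alt str_to_clean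
instance (str_to_clean : String) (out : String) : Decidable (Spec_clean_string_dots str_to_clean out) := by unfold Spec_clean_string_dots; infer_instance

-- ===== CLAIM (what is proved, stated in full; the proofs are below) =====
def Claim_equal_clean_string_dots : Prop := ∀ (str_to_clean : String), Dom_clean_string_dots str_to_clean → Spec_clean_string_dots str_to_clean (clean_string_dots str_to_clean)

-- ===== LEMMAS AND PROOFS =====

-- the loop body of A, on characters
def pvStep (acc : Bool × List Char) (c : Char) : Bool × List Char :=
  let sr := if c ≠ '.' ∧ c ≠ ' ' then true else acc.1
  (sr, if sr = true then acc.2 ++ [c] else acc.2)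

def pvP (c : Char) : Bool := c == '.' || c == ' '

theorem pvStep_true (r : List Char) (acc : List Char) :
    r.foldl pvStep (true, acc) = (true, acc ++ r) := by
  induction r generalizing acc with
  | nil => simp
  | cons c r ih =>
      have hstep : pvStep (true, acc) c = (true, acc ++ [c]) := by simp [pvStep]
      rw [List.foldl_cons, hstep, ih]
      simp

theorem pvStep_false (r : List Char) :
    (r.foldl pvStep (false, [])).2 = r.dropWhile pvP := by
  induction r with
  | nil => rfl
  | cons c r ih =>
      by_cases h : pvP c = true
      · have h' : ¬ (c ≠ '.' ∧ c ≠ ' ') := by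
          simp [pvP] at h; rcases h with h | h <;> simp [h]
        simp only [List.foldl_cons, pvStep, if_neg h', List.dropWhile_cons, h, if_pos]
        exact ih
      · have h' : c ≠ '.' ∧ c ≠ ' ' := by
          simp [pvP] at h; exact h
        simp [List.foldl_cons, pvStep, if_pos h', h, pvStep_true]

theorem pvAltEnd_append (xs : List Char) (x : Char) (n : Nat) (hn : n ≤ xs.length) :
    pvAltEnd (xs ++ [x]) n = pvAltEnd xs n := by
  induction n with
  | zero => rfl
  | succ n ih =>
      have hget : (xs ++ [x]).getD n ' ' = xs.getD n ' ' := by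
        have : n < xs.length := hn
        simp [List.getD, List.getElem?_append_left this]
      simp only [pvAltEnd, hget]
      split_ifs <;> simp [ih (Nat.le_of_succ_le hn)]

theorem pvAltEnd_le (l : List Char) (n : Nat) : pvAltEnd l n ≤ n := by
  induction n with
  | zero => exact Nat.le_refl 0
  | succ n ih =>
      simp only [pvAltEnd]
      split_ifs
      · exact Nat.le_succ_of_le ih
      · exact Nat.le_refl _

theorem pvTake_altEnd (l : List Char) :
    l.take (pvAltEnd l l.length) = (l.reverse.dropWhile pvP).reverse := by
  induction l using List.reverseRecOn with
  | nil => rfl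
  | append_singleton xs x ih =>
      have hlen : (xs ++ [x]).length = xs.length + 1 := by simp
      have hget : (xs ++ [x]).getD xs.length ' ' = x := by
        simp [List.getD]
      by_cases h : pvP x = true
      · have h' : x = '.' ∨ x = ' ' := by
          simp [pvP] at h; rcases h with h | h <;> simp [h]
        have : pvAltEnd (xs ++ [x]) (xs.length + 1) = pvAltEnd xs xs.length := by
          simp only [pvAltEnd, hget, if_pos h']
          exact pvAltEnd_append xs x xs.length (Nat.le_refl _)
        rw [hlen, this,
            List.take_append_of_le_length (pvAltEnd_le xs xs.length), ih]
        simp [h]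
      · have h' : ¬ (x = '.' ∨ x = ' ') := by
          simp [pvP] at h; simp [h]
        have : pvAltEnd (xs ++ [x]) (xs.length + 1) = xs.length + 1 := by
          simp only [pvAltEnd, hget, if_neg h']
        rw [hlen, this]
        simp [List.take_of_length_le, h]

-- ===== VERDICT (by name: the statement is the Claim_ definition above) =====
theorem clean_string_dots_spec : Claim_equal_clean_string_dots := by
  unfold Claim_equal_clean_string_dots
  intro s _
  unfold Spec_clean_string_dots clean_string_dots clean_string_dots_alt
  dsimp only
  set l := s.toList with hl
  -- A's range is the reverse of range(0, len)
  have hrange : PySem.List.pyRange (PySem.Str.len s - 1) (-1) (-1)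
      = (PySem.List.pyRange 0 (PySem.Str.len s) 1).reverse := by
    simpa using PySem.List.pyRange_neg_one_eq_reverse (PySem.Str.len s - 1) (-1)
  have hmap : (PySem.List.pyRange 0 (PySem.Str.len s) 1).map
      (fun i => PySem.List.pyGetD l i ' ') = l := by
    simpa [PySem.Str.len_eq, hl] using PySem.List.map_pyGetD_pyRange_zero l ' '
  have hfold : ∀ (L : List Int) (init : Bool × List Char),
      L.foldl (fun (acc : Bool × List Char) i =>
          let c := PySem.List.pyGetD l i ' '
          let sr := if c ≠ '.' ∧ c ≠ ' ' then true else acc.1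
          (sr, if sr = true then acc.2 ++ [c] else acc.2)) init
        = (L.map (fun i => PySem.List.pyGetD l i ' ')).foldl pvStep init := by
    intro L init
    rw [List.foldl_map]
    rfl
  rw [hrange, hfold, List.map_reverse, hmap]
  rw [PySem.List.slice?_none_none_neg_one]
  have hto : PySem.List.slice l none (some ((pvAltEnd l l.length : Nat) : Int))
      = l.take (pvAltEnd l l.length) := PySem.List.slice_to_natCast l _
  rw [Option.getD_some, pvStep_false, hto, pvTake_altEnd]
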